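-- pv_equiv track=rewrite | github.com/BaldeGi/BAC | BAC1/INFO1/Exam_blanc_et_Entrainements/Exercices_entrainement.py | caracteres_occurences
-- ===== SOURCE A (Python) =====
-- def caracteres_occurences(l):
--     d={}
--     lst=[]
--     for i in range(len(l)):
--         for j in range(len(l[i])):
--              if  l[i][j] not in lst:
--                  lst.append(l[i][j])
--     for k in lst:
--         value=[]
--         for i in range(len(l)):
--             for j in range(len(l[i])):
--                 if k==l[i][j]:
--                     value.append(i)
--                     break
--         d[k]=value
--     return d
-- ===== SOURCE B (Python) =====
-- def caracteres_occurences(l):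
--     d = {}
--     for i, row in enumerate(l):
--         seen = set()
--         for c in row:
--             if c not in seen:
--                 seen.add(c)
--                 d.setdefault(c, []).append(i)
--     return d
-- ===== Notes on version B (the rewrite author's own statement) =====
-- stated objective: faster
-- what changed: Replaces A's two-phase collect-unique-then-rescan-all-rows-per-character with a single pass over the rows that records each row index under every character on its first occurrence in that row (per-row seen set + dict setdefault).
import Mathlib
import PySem

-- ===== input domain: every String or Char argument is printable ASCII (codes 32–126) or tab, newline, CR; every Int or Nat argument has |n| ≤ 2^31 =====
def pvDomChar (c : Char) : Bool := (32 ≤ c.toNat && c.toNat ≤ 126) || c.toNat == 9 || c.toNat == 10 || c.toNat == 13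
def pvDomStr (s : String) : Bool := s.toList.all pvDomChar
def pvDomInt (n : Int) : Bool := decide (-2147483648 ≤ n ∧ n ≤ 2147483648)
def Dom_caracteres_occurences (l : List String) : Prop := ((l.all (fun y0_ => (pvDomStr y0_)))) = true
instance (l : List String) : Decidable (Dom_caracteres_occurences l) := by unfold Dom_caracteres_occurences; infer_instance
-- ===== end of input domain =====

-- B builds the char→row-index map in one pass over the rows (per-row seen set + setdefault)
-- instead of A's unique-character pre-pass followed by a full rescan of all rows per character.


-- ===== PORT A =====
-- A's inner j-loop with break: append i at the first j with k == l[i][j]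
def pvScanA (k : String) (i : Int) (cs : List Char) (value : List Int) : List Int :=
  match cs with
  | [] => value
  | c :: rest => if k == String.ofList [c] then value ++ [i] else pvScanA k i rest value

def caracteres_occurences (l : List String) : List (String × List Int) :=
  let lst : List String := l.foldl (fun lst s =>
    s.toList.foldl (fun lst c =>
      if lst.contains (String.ofList [c]) then lst else lst ++ [String.ofList [c]]) lst) []
  (lst.foldl (fun d k =>
      d.insert k ((PySem.List.enumerate l 0).foldl (fun value p => pvScanA k p.1 p.2.toList value) []))
    (PySem.Dict.empty : PySem.Dict String (List Int))).items

def caracteres_occurences_alt (l : List String) : List (String × List Int) :=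
  ((PySem.List.enumerate l 0).foldl (fun d p =>
      (p.2.toList.foldl
        (fun (st : PySem.Set String × PySem.Dict String (List Int)) c =>
          let s := String.ofList [c]
          if PySem.Set.contains st.1 s then st
          else (PySem.Set.add st.1 s, st.2.modify s [] (· ++ [p.1])))
        ((PySem.Set.empty : PySem.Set String), d)).2)
    (PySem.Dict.empty : PySem.Dict String (List Int))).items

-- ===== PRECONDITION & SPEC =====
def Spec_caracteres_occurences (l : List String) (out : List (String × List Int)) : Prop := out = caracteres_occurences_alt l
instance (l : List String) (out : List (String × List Int)) : Decidable (Spec_caracteres_occurences l out) := by unfold Spec_caracteres_occurences; infer_instance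

-- ===== CLAIM (what is proved, stated in full; the proofs are below) =====
def Claim_equal_caracteres_occurences : Prop := ∀ (l : List String), Dom_caracteres_occurences l → Spec_caracteres_occurences l (caracteres_occurences l)

-- ===== LEMMAS AND PROOFS =====

def pvStrs (s : String) : List String := s.toList.map (fun c => String.ofList [c])

def pvOcc (l : List String) (k : String) : List Int :=
  (PySem.List.enumerate l 0).flatMap (fun p => if k ∈ pvStrs p.2 then [p.1] else [])

def pvCanon (l : List String) : List (String × List Int) :=
  (PySem.Set.ofList (l.flatMap pvStrs)).map (fun k => (k, pvOcc l k))

-- the new (not-yet-seen) elements of xs in first-occurrence order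
def pvNew (xs : List String) (seen : PySem.Set String) : List String :=
  match xs with
  | [] => []
  | s :: rest =>
    if PySem.Set.contains seen s then pvNew rest seen
    else s :: pvNew rest (PySem.Set.add seen s)

theorem pvFoldAdd_eq (xs : List String) : ∀ seen : PySem.Set String,
    xs.foldl PySem.Set.add seen = seen ++ pvNew xs seen := by
  induction xs with
  | nil => intro seen; simp [pvNew]
  | cons x rest ih =>
    intro seen
    rw [List.foldl_cons]
    by_cases h : PySem.Set.contains seen x
    · rw [show PySem.Set.add seen x = seen from if_pos h, ih]
      simp only [pvNew, h, if_pos]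
    · have ha : PySem.Set.add seen x = seen ++ [x] := if_neg h
      rw [show pvNew (x :: rest) seen = x :: pvNew rest (PySem.Set.add seen x) from by
        simp only [pvNew]; rw [if_neg h], ha, ih]
      simp

theorem pvNew_idem (xs : List String) : ∀ u s : PySem.Set String,
    (∀ y ∈ u, y ∈ s) → pvNew (pvNew xs u) s = pvNew xs s := by
  induction xs with
  | nil => intro u s _; simp [pvNew]
  | cons x rest ih =>
    intro u s hus
    by_cases hu : x ∈ u
    · have hs : x ∈ s := hus x hu
      rw [show pvNew (x :: rest) u = pvNew rest u from by
          simp [pvNew, PySem.Set.contains_iff, hu],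
        show pvNew (x :: rest) s = pvNew rest s from by
          simp [pvNew, PySem.Set.contains_iff, hs]]
      exact ih u s hus
    · by_cases hs : x ∈ s
      · simp only [pvNew]
        rw [if_neg (by simp [PySem.Set.contains_iff, hu]), if_pos (by simp [PySem.Set.contains_iff, hs])]
        simp only [pvNew]
        rw [if_pos (by simp [PySem.Set.contains_iff, hs])]
        exact ih _ _ (by intro y hy; rw [PySem.Set.mem_add] at hy; rcases hy with h | h; exact hus y h; exact h ▸ hs)
      · simp only [pvNew]
        rw [if_neg (by simp [PySem.Set.contains_iff, hu]), if_neg (by simp [PySem.Set.contains_iff, hs])]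
        simp only [pvNew]
        rw [if_neg (by simp [PySem.Set.contains_iff, hs])]
        congr 1
        exact ih _ _ (by intro y hy; rw [PySem.Set.mem_add] at hy; rw [PySem.Set.mem_add]; rcases hy with h | h; exact Or.inl (hus y h); exact Or.inr h)

theorem pvNew_nil (xs : List String) : pvNew xs [] = PySem.Set.ofList xs := by
  have := pvFoldAdd_eq xs []
  simp only [List.nil_append] at this
  rw [← this]; rfl

-- Set.ofList over per-chunk dedup equals Set.ofList of the concatenation
theorem pvOfList_chunks {β : Type} (l : List β) (f : β → List String) :
    PySem.Set.ofList (l.flatMap (fun x => PySem.Set.ofList (f x))) = PySem.Set.ofList (l.flatMap f) := by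
  rw [PySem.Set.ofList, PySem.Set.ofList, List.foldl_flatMap, List.foldl_flatMap]
  apply PySem.List.foldl_congr_mem
  intro acc x _
  rw [pvFoldAdd_eq, pvFoldAdd_eq, ← pvNew_nil, pvNew_idem (f x) [] acc (by simp)]

theorem pvFilter_nodup (zs : List String) (k : String) (h : zs.Nodup) :
    zs.filter (fun x => x == k) = if k ∈ zs then [k] else [] := by
  induction zs with
  | nil => simp
  | cons z rest ih =>
    rcases List.nodup_cons.mp h with ⟨hz, hrest⟩
    by_cases hzk : z = k
    · subst hzk
      rw [List.filter_cons_of_pos (by simp), ih hrest, if_neg hz, if_pos (by simp)]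
    · rw [List.filter_cons_of_neg (by simp [hzk]), ih hrest]
      simp [Ne.symm hzk]

theorem pvFM {α β : Type} (P : α → Prop) [DecidablePred P] (f : α → β) (l : List α) :
    (l.filter (fun x => decide (P x))).map f = l.flatMap (fun x => if P x then [f x] else []) := by
  induction l with
  | nil => simp
  | cons x rest ih =>
    by_cases h : P x
    · rw [List.filter_cons_of_pos (by simp [h]), List.flatMap_cons, if_pos h]
      simp [ih]
    · rw [List.filter_cons_of_neg (by simp [h]), List.flatMap_cons, if_neg h]
      simp [ih]

theorem pvScanA_eq (k : String) (i : Int) (cs : List Char) (v : List Int) :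
    pvScanA k i cs v = if k ∈ cs.map (fun c => String.ofList [c]) then v ++ [i] else v := by
  induction cs with
  | nil => simp [pvScanA]
  | cons c rest ih =>
    simp only [pvScanA, List.map_cons, List.mem_cons]
    by_cases h : k = String.ofList [c]
    · simp [h]
    · simp [h, ih]

theorem pvValueA (l : List String) (k : String) :
    (PySem.List.enumerate l 0).foldl (fun value p => pvScanA k p.1 p.2.toList value) [] = pvOcc l k := by
  rw [PySem.List.foldl_congr_mem _ _
      (fun value p => if k ∈ pvStrs p.2 then value ++ [p.1] else value) _
      (by intro acc p _; rw [pvScanA_eq]; rfl)]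
  rw [PySem.List.foldl_append_ite (fun p : Int × String => k ∈ pvStrs p.2) (fun p => p.1)]
  rw [List.nil_append, pvFM, pvOcc]

theorem pvA_eq_canon (l : List String) : caracteres_occurences l = pvCanon l := by
  show (List.foldl _ PySem.Dict.empty (l.foldl _ [])).items = _
  have hstep : ∀ (acc : List String) (s : String),
      s.toList.foldl (fun lst c =>
        if lst.contains (String.ofList [c]) then lst else lst ++ [String.ofList [c]]) acc
      = (pvStrs s).foldl PySem.Set.add acc := by
    intro acc s
    rw [pvStrs, List.foldl_map]
    rfl
  have hlst : (l.foldl (fun lst s =>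
      s.toList.foldl (fun lst c =>
        if lst.contains (String.ofList [c]) then lst else lst ++ [String.ofList [c]]) lst) [])
      = PySem.Set.ofList (l.flatMap pvStrs) := by
    rw [PySem.Set.ofList, List.foldl_flatMap]
    exact PySem.List.foldl_congr_mem _ _ _ _ (fun acc s _ => hstep acc s)
  rw [hlst]
  rw [PySem.Dict.items_foldl_insert_fresh _ (fun a => a) _ _
      (fun a _ => PySem.Dict.contains_empty a)
      (by simpa using PySem.Set.nodup_ofList (l.flatMap pvStrs))]
  rw [show (PySem.Dict.empty : PySem.Dict String (List Int)).items = [] from rfl,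
    List.nil_append, pvCanon]
  exact List.map_congr_left (fun k _ => by rw [pvValueA])

theorem pvInner (i : Int) (cs : List Char) : ∀ (seen : PySem.Set String) (d : PySem.Dict String (List Int)),
    (cs.foldl
      (fun (st : PySem.Set String × PySem.Dict String (List Int)) c =>
        let s := String.ofList [c]
        if PySem.Set.contains st.1 s then st
        else (PySem.Set.add st.1 s, st.2.modify s [] (· ++ [i])))
      (seen, d)).2
    = (pvNew (cs.map (fun c => String.ofList [c])) seen).foldl
        (fun d s => d.modify s [] (· ++ [i])) d := by
  induction cs with
  | nil => intro seen d; simp [pvNew]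
  | cons c rest ih =>
    intro seen d
    by_cases h : PySem.Set.contains seen (String.ofList [c])
    · simp only [List.foldl_cons, List.map_cons, pvNew, h, if_pos]
      exact ih seen d
    · simp only [List.foldl_cons, List.map_cons, pvNew, h, Bool.false_eq_true, if_false, if_neg,
        not_false_eq_true]
      exact ih _ _

theorem pvB_eq_canon (l : List String) : caracteres_occurences_alt l = pvCanon l := by
  rw [caracteres_occurences_alt]
  have hrow : ∀ (d : PySem.Dict String (List Int)) (p : Int × String),
      (p.2.toList.foldl
        (fun (st : PySem.Set String × PySem.Dict String (List Int)) c =>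
          let s := String.ofList [c]
          if PySem.Set.contains st.1 s then st
          else (PySem.Set.add st.1 s, st.2.modify s [] (· ++ [p.1])))
        ((PySem.Set.empty : PySem.Set String), d)).2
      = ((PySem.Set.ofList (pvStrs p.2)).map (fun s => (s, p.1))).foldl
          (fun d (q : String × Int) => d.modify q.1 [] (· ++ [q.2])) d := by
    intro d p
    rw [pvInner p.1 p.2.toList PySem.Set.empty d, List.foldl_map]
    show (pvNew (pvStrs p.2) []).foldl _ d = _
    rw [pvNew_nil]
  rw [PySem.List.foldl_congr_mem _ _ _ _ (fun d p _ => hrow d p), ← List.foldl_flatMap]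
  set P : List (String × Int) := (PySem.List.enumerate l 0).flatMap
      (fun p => (PySem.Set.ofList (pvStrs p.2)).map (fun s => (s, p.1))) with hP
  have hnodup : (P.foldl (fun d (q : String × Int) => d.modify q.1 [] (· ++ [q.2])) PySem.Dict.empty).keys.Nodup := by
    apply PySem.Dict.nodup_keys_foldl_modify_key P (fun q => q.1) [] (fun _ q => (· ++ [q.2]))
    simp [PySem.Dict.keys_empty]
  rw [PySem.Dict.items_eq_map_keys _ hnodup []]
  rw [PySem.Dict.keys_foldl_modify_key P (fun q => q.1) [] (fun _ q => (· ++ [q.2]))]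
  have hkeys : PySem.Set.update (PySem.Dict.empty : PySem.Dict String (List Int)).keys (P.map (fun q => q.1))
      = PySem.Set.ofList (l.flatMap pvStrs) := by
    have h1 : P.map (fun q : String × Int => q.1)
        = (PySem.List.enumerate l 0).flatMap (fun p => PySem.Set.ofList (pvStrs p.2)) := by
      rw [hP, List.map_flatMap]
      refine List.flatMap_congr (fun p _ => ?_)
      rw [List.map_map, show ((fun q : String × Int => q.1) ∘ fun s : String => (s, p.1)) = id from rfl, List.map_id]
    rw [show (PySem.Dict.empty : PySem.Dict String (List Int)).keys = [] from rfl]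
    show PySem.Set.ofList _ = _
    rw [h1, pvOfList_chunks]
    congr 1
    conv_rhs => rw [← PySem.List.map_snd_enumerate l 0]
    rw [List.flatMap_map]
  rw [hkeys, pvCanon]
  apply List.map_congr_left
  intro k _
  rw [PySem.Dict.getD_foldl_modify_append P PySem.Dict.empty k]
  rw [PySem.Dict.getD_empty, List.nil_append]
  congr 1
  rw [hP, List.filter_flatMap, List.map_flatMap, pvOcc]
  apply List.flatMap_congr
  intro p _
  rw [List.filter_map, List.map_map]
  have : ((fun q : String × Int => q.1 == k) ∘ fun s => (s, p.1)) = fun s => s == k := rfl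
  rw [this, pvFilter_nodup _ k (PySem.Set.nodup_ofList _)]
  by_cases h : k ∈ pvStrs p.2
  · rw [if_pos ((PySem.Set.mem_ofList _ _).mpr h), if_pos h]; rfl
  · rw [if_neg (fun hc => h ((PySem.Set.mem_ofList _ _).mp hc)), if_neg h]; rfl

-- ===== VERDICT (by name: the statement is the Claim_ definition above) =====
theorem caracteres_occurences_spec : Claim_equal_caracteres_occurences := by
  intro l _
  unfold Spec_caracteres_occurences
  rw [pvA_eq_canon, pvB_eq_canon]
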